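-- pv_equiv track=rewrite | github.com/kevin-toles/Code-Orchestrator-Service | scripts/find_missing_term_pages.py | find_index_section
-- ===== SOURCE A (Python) =====
-- def find_index_section(pages):
--     """Find and return index content from book pages."""
--     index_content = []
--     in_index = False
--     index_start_page = None
--
--     for i, page in enumerate(pages):
--         content = page.get('content', '') if isinstance(page, dict) else str(page)
--         if not in_index:
--             first_150 = content[:150].lower()
--             if any(marker in first_150 for marker in ['index\n', 'index\r', '\nindex\n', 'glossary\n']):
--                 in_index = True
--                 index_start_page = i + 1
--         if in_index:
--             index_content.append((i + 1, content))  # (page_num, content)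
--
--     return index_content, index_start_page
-- ===== SOURCE B (Python) =====
-- def find_index_section(pages):
--     """Find and return index content from book pages (locate-then-collect)."""
--     def content_of(page):
--         return page.get('content', '') if isinstance(page, dict) else str(page)
--
--     def has_marker(content):
--         first_150 = content[:150].lower()
--         return any(m in first_150 for m in ('index\n', 'index\r', '\nindex\n', 'glossary\n'))
--
--     start = next((i for i, p in enumerate(pages) if has_marker(content_of(p))), None)
--     if start is None:
--         return [], None
--     return [(j, content_of(p)) for j, p in enumerate(pages[start:], start + 1)], start + 1
-- ===== Notes on version B (the rewrite author's own statement) =====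
-- stated objective: alternative
-- what changed: Replaces the single flag-driven pass (in_index boolean threaded through one loop) with a locate-then-collect decomposition: first find the start index with a generator/next search, then build the result by enumerating the tail slice.
import Mathlib
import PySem

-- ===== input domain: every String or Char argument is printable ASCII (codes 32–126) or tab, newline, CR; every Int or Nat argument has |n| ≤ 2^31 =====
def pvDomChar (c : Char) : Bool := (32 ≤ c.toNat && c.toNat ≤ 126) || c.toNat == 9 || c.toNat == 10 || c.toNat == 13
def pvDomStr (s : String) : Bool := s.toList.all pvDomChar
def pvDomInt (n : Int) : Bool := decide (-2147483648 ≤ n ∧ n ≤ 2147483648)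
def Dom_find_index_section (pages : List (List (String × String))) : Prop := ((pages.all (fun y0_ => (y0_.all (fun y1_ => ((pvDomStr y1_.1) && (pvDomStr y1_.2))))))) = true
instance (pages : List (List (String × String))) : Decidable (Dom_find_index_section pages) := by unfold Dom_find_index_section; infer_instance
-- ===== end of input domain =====

-- B replaces A's flag-driven single pass by a locate-then-collect decomposition; same return value, no side effects.

-- shared content extraction: page.get('content', '') (pages are dicts here; first-match lookup)
def pvContent (page : List (String × String)) : String :=
  match page.find? (fun kv => kv.1 == "content") with
  | some kv => kv.2
  | none => ""

-- content[:150].lower() contains one of the markers (checked in the source order)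
def pvHasMarker (content : String) : Bool :=
  let first150 := PySem.Str.lower (PySem.Str.slice content none (some 150))
  PySem.Str.isIn "index\n" first150 || PySem.Str.isIn "index\r" first150 ||
    PySem.Str.isIn "\nindex\n" first150 || PySem.Str.isIn "glossary\n" first150

-- ===== PORT A =====
-- loop body of A: state = (index_content, in_index, index_start_page)
def stepA (s : List (Int × String) × Bool × Option Int) (ip : Int × List (String × String)) :
    List (Int × String) × Bool × Option Int :=
  let content := pvContent ip.2
  let s1 := if s.2.1 = false then
      (if pvHasMarker content then (s.1, true, some (ip.1 + 1)) else s)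
    else s
  if s1.2.1 then (s1.1 ++ [(ip.1 + 1, content)], s1.2.1, s1.2.2) else s1

def find_index_section (pages : List (List (String × String))) : (List (Int × String)) × Option Int :=
  let r := (PySem.List.enumerate pages).foldl stepA ([], false, none)
  (r.1, r.2.2)

-- ===== PORT B =====
-- next((i for i, p in enumerate(pages) if has_marker(content_of(p))), None)
def findStartB : List (List (String × String)) → Int → Option Int
  | [], _ => none
  | p :: rest, i => if pvHasMarker (pvContent p) then some i else findStartB rest (i + 1)

def find_index_section_alt (pages : List (List (String × String))) : (List (Int × String)) × Option Int :=
  match findStartB pages 0 with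
  | none => ([], none)
  | some s =>
      -- pages[start:] with start ≥ 0 is List.drop (exact here since findStartB 0 returns a nonnegative index)
      ((PySem.List.enumerate (pages.drop s.toNat) (s + 1)).map (fun jp => (jp.1, pvContent jp.2)),
       some (s + 1))

-- ===== PRECONDITION & SPEC =====
def Spec_find_index_section (pages : List (List (String × String))) (out : (List (Int × String)) × Option Int) : Prop := out = find_index_section_alt pages
instance (pages : List (List (String × String))) (out : (List (Int × String)) × Option Int) : Decidable (Spec_find_index_section pages out) := by unfold Spec_find_index_section; infer_instance

-- ===== CLAIM (what is proved, stated in full; the proofs are below) =====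
def Claim_equal_find_index_section : Prop := ∀ (pages : List (List (String × String))), Dom_find_index_section pages → Spec_find_index_section pages (find_index_section pages)

-- ===== LEMMAS AND PROOFS =====

-- once in_index is true, A's loop just appends (i+1, content) for every remaining page
lemma foldl_stepA_inIndex (xs : List (List (String × String))) :
    ∀ (k : Int) (acc : List (Int × String)) (o : Option Int),
    (PySem.List.enumerate xs k).foldl stepA (acc, true, o)
      = (acc ++ (PySem.List.enumerate xs k).map (fun ip => (ip.1 + 1, pvContent ip.2)), true, o) := by
  induction xs with
  | nil => intro k acc o; simp [PySem.List.enumerate_nil]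
  | cons p rest ih =>
      intro k acc o
      simp only [PySem.List.enumerate_cons, List.foldl_cons, List.map_cons]
      rw [show stepA (acc, true, o) (k, p)
            = (acc ++ [(k + 1, pvContent p)], true, o) by simp [stepA]]
      rw [ih (k + 1) (acc ++ [(k + 1, pvContent p)]) o]
      simp

-- re-indexing: enumerating from s+1 equals enumerating from s and adding 1 to each index
lemma enumerate_map_shift (xs : List (List (String × String))) :
    ∀ (s : Int),
    (PySem.List.enumerate xs (s + 1)).map (fun jp => (jp.1, pvContent jp.2))
      = (PySem.List.enumerate xs s).map (fun ip => (ip.1 + 1, pvContent ip.2)) := by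
  induction xs with
  | nil => intro s; simp [PySem.List.enumerate_nil]
  | cons p rest ih =>
      intro s
      simp only [PySem.List.enumerate_cons, List.map_cons]
      rw [ih (s + 1)]

lemma findStartB_ge (xs : List (List (String × String))) :
    ∀ (k s : Int), findStartB xs k = some s → k ≤ s := by
  induction xs with
  | nil => intro k s h; simp [findStartB] at h
  | cons p rest ih =>
      intro k s h
      by_cases hm : pvHasMarker (pvContent p)
      · simp [findStartB, hm] at h; omega
      · simp [findStartB, hm] at h
        have := ih (k + 1) s h
        omega

-- A's whole loop, started in the searching state, computes B's locate-then-collect result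
lemma mainA (pages : List (List (String × String))) :
    ∀ (k : Int),
    (((PySem.List.enumerate pages k).foldl stepA ([], false, none)).1,
     ((PySem.List.enumerate pages k).foldl stepA ([], false, none)).2.2)
      = (match findStartB pages k with
         | none => ([], none)
         | some s =>
             ((PySem.List.enumerate (pages.drop (s - k).toNat) (s + 1)).map
                 (fun jp => (jp.1, pvContent jp.2)),
              some (s + 1))) := by
  induction pages with
  | nil => intro k; simp [PySem.List.enumerate_nil, findStartB]
  | cons p rest ih =>
      intro k
      by_cases hm : pvHasMarker (pvContent p)
      · simp only [PySem.List.enumerate_cons, List.foldl_cons, findStartB, hm, if_pos]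
        rw [show stepA ([], false, none) (k, p)
              = ([(k + 1, pvContent p)], true, some (k + 1)) by simp [stepA, hm]]
        rw [foldl_stepA_inIndex rest (k + 1) [(k + 1, pvContent p)] (some (k + 1))]
        have hdrop : ((k : Int) - k).toNat = 0 := by omega
        simp only [hdrop, List.drop_zero, PySem.List.enumerate_cons, List.map_cons]
        rw [enumerate_map_shift rest (k + 1)]
        simp
      · simp only [PySem.List.enumerate_cons, List.foldl_cons]
        rw [show stepA ([], false, none) (k, p) = ([], false, none) by simp [stepA, hm]]
        rw [ih (k + 1)]
        simp only [findStartB, hm, if_neg, Bool.false_eq_true, not_false_iff]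
        cases h : findStartB rest (k + 1) with
        | none => simp
        | some s =>
            have hge := findStartB_ge rest (k + 1) s h
            have hdrop : (s - k).toNat = (s - (k + 1)).toNat + 1 := by omega
            simp [hdrop]

-- ===== VERDICT (by name: the statement is the Claim_ definition above) =====
theorem find_index_section_spec : Claim_equal_find_index_section := by
  intro pages _
  show find_index_section pages = find_index_section_alt pages
  unfold find_index_section find_index_section_alt
  have h := mainA pages 0
  rw [h]
  cases hs : findStartB pages 0 with
  | none => rfl
  | some s =>
      have := findStartB_ge pages 0 s hs
      simp
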